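-- pv_equiv track=rewrite | github.com/xuxanwan/Note-Station-to-html | nsx2html.py | sanitise_path_string
-- ===== SOURCE A (Python) =====
-- def sanitise_path_string(path_str):
--     for char in (':', '/', '\\', '|'):
--         path_str = path_str.replace(char, '-')
--     for char in ('?', '*'):
--         path_str = path_str.replace(char, '')
--     path_str = path_str.replace('<', '(')
--     path_str = path_str.replace('>', ')')
--     path_str = path_str.replace('"', "")
--     path_str = path_str.replace("'", "")
--     path_str = path_str.replace('\n', "")
--
--     return path_str[:240].strip()
-- ===== SOURCE B (Python) =====
-- _TABLE = str.maketrans({':': '-', '/': '-', '\\': '-', '|': '-',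
--                         '?': None, '*': None, '"': None, "'": None, '\n': None,
--                         '<': '(', '>': ')'})
--
-- def sanitise_path_string(path_str):
--     return path_str.translate(_TABLE)[:240].strip()
-- ===== Notes on version B (the rewrite author's own statement) =====
-- stated objective: idiomatic
-- what changed: Replaces the eleven sequential str.replace scans with a single str.translate pass over one precomputed translation table, then the same [:240].strip().
import Mathlib
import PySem

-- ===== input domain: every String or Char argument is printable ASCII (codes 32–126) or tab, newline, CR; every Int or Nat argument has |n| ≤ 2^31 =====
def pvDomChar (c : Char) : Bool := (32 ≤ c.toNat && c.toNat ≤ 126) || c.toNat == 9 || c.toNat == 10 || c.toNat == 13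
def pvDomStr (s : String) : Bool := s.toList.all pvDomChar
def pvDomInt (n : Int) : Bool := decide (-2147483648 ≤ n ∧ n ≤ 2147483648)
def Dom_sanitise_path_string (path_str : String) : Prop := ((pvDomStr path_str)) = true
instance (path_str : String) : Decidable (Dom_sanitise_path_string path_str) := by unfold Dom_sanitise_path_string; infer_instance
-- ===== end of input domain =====

-- B replaces A's eleven sequential replace() scans with one table-driven pass (translate); same [:240].strip().


-- ===== PORT A =====
-- literal transliteration: two replace loops, then the seven single replaces, then [:240].strip()
def sanitise_path_string (path_str : String) : String :=
  let s1 := [':', '/', '\\', '|'].foldl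
    (fun s c => PySem.Str.replace s (String.ofList [c]) "-") path_str
  let s2 := ['?', '*'].foldl
    (fun s c => PySem.Str.replace s (String.ofList [c]) "") s1
  let s3 := PySem.Str.replace s2 "<" "("
  let s4 := PySem.Str.replace s3 ">" ")"
  let s5 := PySem.Str.replace s4 "\"" ""
  let s6 := PySem.Str.replace s5 "'" ""
  let s7 := PySem.Str.replace s6 "\n" ""
  PySem.Str.strip (PySem.Str.slice s7 none (some 240))

-- ===== PORT B =====
-- the translation table of Source B, as a Char → Option Char map (none = delete)
def pvTr (c : Char) : Option Char :=
  if c = ':' ∨ c = '/' ∨ c = '\\' ∨ c = '|' then some '-'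
  else if c = '?' ∨ c = '*' ∨ c = '"' ∨ c = '\'' ∨ c = '\n' then none
  else if c = '<' then some '('
  else if c = '>' then some ')'
  else some c

def sanitise_path_string_alt (path_str : String) : String :=
  String.ofList (PySem.Chars.strip ((path_str.toList.filterMap pvTr).take 240))

-- ===== PRECONDITION & SPEC =====
def Spec_sanitise_path_string (path_str : String) (out : String) : Prop := out = sanitise_path_string_alt path_str
instance (path_str : String) (out : String) : Decidable (Spec_sanitise_path_string path_str out) := by unfold Spec_sanitise_path_string; infer_instance

-- ===== CLAIM (what is proved, stated in full; the proofs are below) =====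
def Claim_equal_sanitise_path_string : Prop := ∀ (path_str : String), Dom_sanitise_path_string path_str → Spec_sanitise_path_string path_str (sanitise_path_string path_str)

-- ===== LEMMAS AND PROOFS =====

-- a single-character replace is a per-character flatMap
theorem replace_go_single (c : Char) (new : List Char) :
    ∀ (l : List Char) (fuel : Nat) (acc : List Char), l.length ≤ fuel →
      PySem.Chars.replace.go [c] new fuel l acc
        = acc.reverse ++ l.flatMap (fun x => if x = c then new else [x]) := by
  intro l
  induction l with
  | nil =>
    intro fuel acc _
    cases fuel <;> simp [PySem.Chars.replace.go]
  | cons x t ih =>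
    intro fuel acc hf
    cases fuel with
    | zero => simp at hf
    | succ fuel =>
      by_cases hx : x = c
      · subst hx
        simp only [PySem.Chars.replace.go, List.isPrefixOf,
          beq_self_eq_true, Bool.true_and, if_pos, List.length_cons] at *
        simp only [List.length_nil, Nat.zero_add, List.drop_succ_cons, List.drop_zero]
        rw [ih fuel (new.reverse ++ acc) (by omega)]
        simp
      · have hpre : [c].isPrefixOf (x :: t) = false := by
          simp [List.isPrefixOf]; exact fun h => (hx h.symm).elim
        simp only [PySem.Chars.replace.go, hpre, Bool.false_eq_true, if_neg, not_false_iff]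
        rw [ih fuel (x :: acc) (by simp at hf; omega)]
        simp [hx]

theorem replace_single (c : Char) (new s : List Char) :
    PySem.Chars.replace s [c] new = s.flatMap (fun x => if x = c then new else [x]) := by
  simp only [PySem.Chars.replace, List.isEmpty_cons, Bool.false_eq_true, if_neg, not_false_iff]
  exact replace_go_single c new s s.length [] le_rfl

-- the composed per-character action of A's eleven replaces equals B's table
theorem chain_eq_filterMap (s : List Char) :
    ((((((((((s.flatMap (fun x => if x = ':' then ['-'] else [x])).flatMap
      (fun x => if x = '/' then ['-'] else [x])).flatMap
      (fun x => if x = '\\' then ['-'] else [x])).flatMap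
      (fun x => if x = '|' then ['-'] else [x])).flatMap
      (fun x => if x = '?' then [] else [x])).flatMap
      (fun x => if x = '*' then [] else [x])).flatMap
      (fun x => if x = '<' then ['('] else [x])).flatMap
      (fun x => if x = '>' then [')'] else [x])).flatMap
      (fun x => if x = '"' then [] else [x])).flatMap
      (fun x => if x = '\'' then [] else [x])).flatMap
      (fun x => if x = '\n' then [] else [x])
      = s.filterMap pvTr := by
  induction s with
  | nil => rfl
  | cons x t ih =>
    simp only [List.flatMap_cons, List.flatMap_append, List.filterMap_cons]
    rw [ih]
    rcases em (x = ':') with h | h1; · subst h; rfl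
    rcases em (x = '/') with h | h2; · subst h; rfl
    rcases em (x = '\\') with h | h3; · subst h; rfl
    rcases em (x = '|') with h | h4; · subst h; rfl
    rcases em (x = '?') with h | h5; · subst h; rfl
    rcases em (x = '*') with h | h6; · subst h; rfl
    rcases em (x = '<') with h | h7; · subst h; rfl
    rcases em (x = '>') with h | h8; · subst h; rfl
    rcases em (x = '"') with h | h9; · subst h; rfl
    rcases em (x = '\'') with h | h10; · subst h; rfl
    rcases em (x = '\n') with h | h11; · subst h; rfl
    simp [pvTr, h1, h2, h3, h4, h5, h6, h7, h8, h9, h10, h11]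

-- ===== VERDICT (by name: the statement is the Claim_ definition above) =====
set_option maxRecDepth 8192 in
theorem sanitise_path_string_spec : Claim_equal_sanitise_path_string := by
  intro path_str _
  unfold Spec_sanitise_path_string sanitise_path_string sanitise_path_string_alt
  simp only [List.foldl_cons, List.foldl_nil]
  unfold PySem.Str.strip
  apply congrArg String.ofList
  apply congrArg PySem.Chars.strip
  rw [PySem.Str.toList_slice, PySem.Chars.slice_eq_listSlice, PySem.List.slice_to _ (by norm_num)]
  have h240 : ((240 : Int)).toNat = 240 := rfl
  rw [h240]
  apply congrArg (List.take 240)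
  simp only [PySem.Str.toList_replace, String.toList_ofList]
  rw [show "-".toList = ['-'] from rfl, show "".toList = ([] : List Char) from rfl,
    show "<".toList = ['<'] from rfl, show "(".toList = ['('] from rfl,
    show ">".toList = ['>'] from rfl, show ")".toList = [')'] from rfl,
    show "\"".toList = ['"'] from rfl, show "'".toList = ['\''] from rfl,
    show "\n".toList = ['\n'] from rfl]
  rw [replace_single, replace_single, replace_single, replace_single, replace_single,
    replace_single, replace_single, replace_single, replace_single, replace_single,
    replace_single]
  exact chain_eq_filterMap path_str.toList
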